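-- pv_equiv track=rewrite | github.com/ndevrio/ESP32_PAJ7620 | view_image.py | bytes_to_9bit_array
-- ===== SOURCE A (Python) =====
-- def bytes_to_9bit_array(data):
--     """Converts a byte array to an array of 9-bit integers.
--
--     Args:
--         data: A byte array (bytes or bytearray).
--
--     Returns:
--         A list of integers, where each integer represents a 9-bit value.
--     """
--     result = []
--     temp = 0
--     bit_count_L = 8
--     bit_count_H = 1
--     i = 0
--     for byte in data:
--         if(i != 0):
--             temp |= byte >> bit_count_L
--             result.append((temp & 0x1FF) >> 1)  # Extract 9 bits
--             temp = 0
--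
--         if(i != 8):
--             temp |= byte << bit_count_H
--
--         bit_count_L -= 1
--         if(bit_count_L < 0):
--             bit_count_L = 8
--         bit_count_H += 1
--         if(bit_count_H > 8):
--             bit_count_H = 0
--
--         i += 1
--         if(i > 8):
--             i = 0
--
--     return result
-- ===== SOURCE B (Python) =====
-- def bytes_to_9bit_array(data):
--     """Converts a byte array to a list of 9-bit values, one 9-byte block at a time.
--
--     Block decomposition: walk the input in 9-byte windows; each output of a
--     window is a closed-form shift/mask over an adjacent byte pair; a trailing
--     partial window contributes one value per byte after its first.
--     """
--     out = []
--     base = 0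
--     while base < len(data):
--         block = data[base:base + 9]
--         out += [(((hi << j) | (lo >> (8 - j))) & 0x1FF) >> 1
--                 for j, (hi, lo) in enumerate(zip(block, block[1:]), 1)]
--         base += 9
--     return out
-- ===== Notes on version B (the rewrite author's own statement) =====
-- stated objective: alternative
-- what changed: Replaces A's rolling temp/bit_count_L/bit_count_H/i accumulator state machine by a recursive decomposition into 9-byte blocks, emitting each output as a closed-form shift/mask over an adjacent byte pair.
import Mathlib
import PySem

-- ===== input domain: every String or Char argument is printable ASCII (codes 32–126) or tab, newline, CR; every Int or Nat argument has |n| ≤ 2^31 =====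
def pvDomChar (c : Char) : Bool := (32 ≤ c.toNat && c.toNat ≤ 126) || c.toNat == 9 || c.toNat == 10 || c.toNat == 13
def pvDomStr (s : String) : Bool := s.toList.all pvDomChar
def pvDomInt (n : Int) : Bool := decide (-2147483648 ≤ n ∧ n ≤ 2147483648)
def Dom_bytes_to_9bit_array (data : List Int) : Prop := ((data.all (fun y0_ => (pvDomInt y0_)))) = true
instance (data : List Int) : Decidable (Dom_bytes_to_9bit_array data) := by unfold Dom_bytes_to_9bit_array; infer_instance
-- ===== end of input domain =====

-- B replaces A's rolling temp/bit-counter state machine by a 9-byte-window walk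
-- with a closed-form shift/mask per adjacent byte pair (objective: alternative).

-- ===== PORT A =====
-- A's loop body over the state (result, temp, bit_count_L, bit_count_H, i), branch for branch
def pvStepA (st : List Int × Int × Int × Int × Int) (byte : Int) : List Int × Int × Int × Int × Int :=
  let result := st.1
  let temp := st.2.1
  let bcl := st.2.2.1
  let bch := st.2.2.2.1
  let i := st.2.2.2.2
  let temp1 := if i ≠ 0 then PySem.Int.bor temp (byte >>> bcl.toNat) else temp
  let result1 := if i ≠ 0 then result ++ [(PySem.Int.band temp1 0x1FF) >>> 1] else result
  let temp2 := if i ≠ 0 then 0 else temp1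
  let temp3 := if i ≠ 8 then PySem.Int.bor temp2 (byte <<< bch.toNat) else temp2
  let bcl1 := bcl - 1
  let bcl2 := if bcl1 < 0 then 8 else bcl1
  let bch1 := bch + 1
  let bch2 := if bch1 > 8 then 0 else bch1
  let i1 := i + 1
  let i2 := if i1 > 8 then 0 else i1
  (result1, temp3, bcl2, bch2, i2)

def bytes_to_9bit_array (data : List Int) : List Int :=
  (data.foldl pvStepA ([], 0, 8, 1, 0)).1

-- ===== PORT B =====
-- the window comprehension: one 9-bit value per adjacent byte pair of the window
def pvBlockOut (block : List Int) : List Int :=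
  (PySem.List.enumerate (block.zip (PySem.List.slice block (some 1) none)) 1).map (fun p =>
    let j : Int := p.1
    let hi : Int := p.2.1
    let lo : Int := p.2.2
    (PySem.Int.band (PySem.Int.bor (hi <<< j.toNat) (lo >>> ((8 : Int) - j).toNat)) 0x1FF) >>> 1)

-- the while loop over the window start `base`
def pvAltLoop (data : List Int) (out : List Int) (base : Int) : List Int :=
  if base < (data.length : Int) then
    let block := PySem.List.slice data (some base) (some (base + 9))
    pvAltLoop data (out ++ pvBlockOut block) (base + 9)
  else out
termination_by ((data.length : Int) - base).toNat
decreasing_by rename_i h; omega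

def bytes_to_9bit_array_alt (data : List Int) : List Int :=
  pvAltLoop data [] 0

-- ===== PRECONDITION & SPEC =====
def Spec_bytes_to_9bit_array (data : List Int) (out : List Int) : Prop := out = bytes_to_9bit_array_alt data
instance (data : List Int) (out : List Int) : Decidable (Spec_bytes_to_9bit_array data out) := by unfold Spec_bytes_to_9bit_array; infer_instance

-- ===== CLAIM (what is proved, stated in full; the proofs are below) =====
def Claim_equal_bytes_to_9bit_array : Prop := ∀ (data : List Int), Dom_bytes_to_9bit_array data → Spec_bytes_to_9bit_array data (bytes_to_9bit_array data)

-- ===== LEMMAS AND PROOFS =====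

-- proof-side helper: the same block decomposition, written as chunk recursion
def pvChunk (l : List Int) : List Int :=
  if l = [] then []
  else pvBlockOut (PySem.List.slice l none (some 9)) ++ pvChunk (PySem.List.slice l (some 9) none)
termination_by l.length
decreasing_by
  rename_i h
  simp [PySem.List.slice_some_none, PySem.List.clampIdx]
  have : l.length ≠ 0 := fun hh => h (List.length_eq_zero_iff.mp hh)
  omega

lemma pv_zero_bor (a : Int) : PySem.Int.bor 0 a = a := by
  rw [PySem.Int.bor_comm, PySem.Int.bor_zero]

lemma pv_chunk_nil : pvChunk [] = [] := by rw [pvChunk]; simp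

@[simp] lemma pv_stepA_0 (res : List Int) (temp b : Int) :
    pvStepA (res, temp, 8, 1, 0) b = (res, PySem.Int.bor temp (b <<< (1 : Nat)), 7, 2, 1) := by
  simp [pvStepA]

@[simp] lemma pv_stepA_1 (res : List Int) (temp b : Int) :
    pvStepA (res, temp, 7, 2, 1) b
      = (res ++ [(PySem.Int.band (PySem.Int.bor temp (b >>> (7 : Nat))) 511) >>> 1], b <<< (2 : Nat), 6, 3, 2) := by
  simp [pvStepA, pv_zero_bor]

@[simp] lemma pv_stepA_2 (res : List Int) (temp b : Int) :
    pvStepA (res, temp, 6, 3, 2) b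
      = (res ++ [(PySem.Int.band (PySem.Int.bor temp (b >>> (6 : Nat))) 511) >>> 1], b <<< (3 : Nat), 5, 4, 3) := by
  simp [pvStepA, pv_zero_bor]

@[simp] lemma pv_stepA_3 (res : List Int) (temp b : Int) :
    pvStepA (res, temp, 5, 4, 3) b
      = (res ++ [(PySem.Int.band (PySem.Int.bor temp (b >>> (5 : Nat))) 511) >>> 1], b <<< (4 : Nat), 4, 5, 4) := by
  simp [pvStepA, pv_zero_bor]

@[simp] lemma pv_stepA_4 (res : List Int) (temp b : Int) :
    pvStepA (res, temp, 4, 5, 4) b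
      = (res ++ [(PySem.Int.band (PySem.Int.bor temp (b >>> (4 : Nat))) 511) >>> 1], b <<< (5 : Nat), 3, 6, 5) := by
  simp [pvStepA, pv_zero_bor]

@[simp] lemma pv_stepA_5 (res : List Int) (temp b : Int) :
    pvStepA (res, temp, 3, 6, 5) b
      = (res ++ [(PySem.Int.band (PySem.Int.bor temp (b >>> (3 : Nat))) 511) >>> 1], b <<< (6 : Nat), 2, 7, 6) := by
  simp [pvStepA, pv_zero_bor]

@[simp] lemma pv_stepA_6 (res : List Int) (temp b : Int) :
    pvStepA (res, temp, 2, 7, 6) b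
      = (res ++ [(PySem.Int.band (PySem.Int.bor temp (b >>> (2 : Nat))) 511) >>> 1], b <<< (7 : Nat), 1, 8, 7) := by
  simp [pvStepA, pv_zero_bor]

@[simp] lemma pv_stepA_7 (res : List Int) (temp b : Int) :
    pvStepA (res, temp, 1, 8, 7) b
      = (res ++ [(PySem.Int.band (PySem.Int.bor temp (b >>> (1 : Nat))) 511) >>> 1], b <<< (8 : Nat), 0, 0, 8) := by
  simp [pvStepA, pv_zero_bor]

@[simp] lemma pv_stepA_8 (res : List Int) (temp b : Int) :
    pvStepA (res, temp, 0, 0, 8) b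
      = (res ++ [(PySem.Int.band (PySem.Int.bor temp (b >>> (0 : Nat))) 511) >>> 1], 0, 8, 1, 0) := by
  simp [pvStepA]

set_option maxHeartbeats 1000000 in
lemma pv_main : ∀ (l res : List Int),
    (List.foldl pvStepA (res, 0, 8, 1, 0) l).1 = res ++ pvChunk l
  | [], res => by simp [pv_chunk_nil]
  | [x1], res => by
      conv_rhs => rw [pvChunk]
      rw [if_neg (by exact List.cons_ne_nil _ _)]
      simp only [pvBlockOut, PySem.List.slice_some_none, PySem.List.slice_to _ (by norm_num : (0:Int) ≤ 9)]
      norm_num [PySem.List.clampIdx]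
      simp only [show Int.toNat 9 = (9:Nat) from rfl, List.take_succ_cons, List.take_nil,
        List.tail_cons, List.zip_nil_right,
        PySem.List.enumerate_nil,
        pv_chunk_nil]
      norm_num [pv_zero_bor, show Int.toNat 0 = (0:Nat) from rfl, show Int.toNat 1 = (1:Nat) from rfl, show Int.toNat 2 = (2:Nat) from rfl, show Int.toNat 3 = (3:Nat) from rfl, show Int.toNat 4 = (4:Nat) from rfl, show Int.toNat 5 = (5:Nat) from rfl, show Int.toNat 6 = (6:Nat) from rfl, show Int.toNat 7 = (7:Nat) from rfl, show Int.toNat 8 = (8:Nat) from rfl, show Int.toNat 9 = (9:Nat) from rfl]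
  | [x1,x2], res => by
      conv_rhs => rw [pvChunk]
      rw [if_neg (by exact List.cons_ne_nil _ _)]
      simp only [pvBlockOut, PySem.List.slice_some_none, PySem.List.slice_to _ (by norm_num : (0:Int) ≤ 9)]
      norm_num [PySem.List.clampIdx]
      simp only [show Int.toNat 9 = (9:Nat) from rfl, List.take_succ_cons, List.take_nil,
        List.tail_cons, List.zip_cons_cons, List.zip_nil_right,
        PySem.List.enumerate_cons, PySem.List.enumerate_nil, List.map_cons, List.map_nil,
        pv_chunk_nil, List.cons_append, List.nil_append]
      norm_num [pv_zero_bor, show Int.toNat 0 = (0:Nat) from rfl, show Int.toNat 1 = (1:Nat) from rfl, show Int.toNat 2 = (2:Nat) from rfl, show Int.toNat 3 = (3:Nat) from rfl, show Int.toNat 4 = (4:Nat) from rfl, show Int.toNat 5 = (5:Nat) from rfl, show Int.toNat 6 = (6:Nat) from rfl, show Int.toNat 7 = (7:Nat) from rfl, show Int.toNat 8 = (8:Nat) from rfl, show Int.toNat 9 = (9:Nat) from rfl]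
  | [x1,x2,x3], res => by
      conv_rhs => rw [pvChunk]
      rw [if_neg (by exact List.cons_ne_nil _ _)]
      simp only [pvBlockOut, PySem.List.slice_some_none, PySem.List.slice_to _ (by norm_num : (0:Int) ≤ 9)]
      norm_num [PySem.List.clampIdx]
      simp only [show Int.toNat 9 = (9:Nat) from rfl, List.take_succ_cons, List.take_nil,
        List.tail_cons, List.zip_cons_cons, List.zip_nil_right,
        PySem.List.enumerate_cons, PySem.List.enumerate_nil, List.map_cons, List.map_nil,
        pv_chunk_nil, List.cons_append, List.nil_append]
      norm_num [pv_zero_bor, show Int.toNat 0 = (0:Nat) from rfl, show Int.toNat 1 = (1:Nat) from rfl, show Int.toNat 2 = (2:Nat) from rfl, show Int.toNat 3 = (3:Nat) from rfl, show Int.toNat 4 = (4:Nat) from rfl, show Int.toNat 5 = (5:Nat) from rfl, show Int.toNat 6 = (6:Nat) from rfl, show Int.toNat 7 = (7:Nat) from rfl, show Int.toNat 8 = (8:Nat) from rfl, show Int.toNat 9 = (9:Nat) from rfl]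
  | [x1,x2,x3,x4], res => by
      conv_rhs => rw [pvChunk]
      rw [if_neg (by exact List.cons_ne_nil _ _)]
      simp only [pvBlockOut, PySem.List.slice_some_none, PySem.List.slice_to _ (by norm_num : (0:Int) ≤ 9)]
      norm_num [PySem.List.clampIdx]
      simp only [show Int.toNat 9 = (9:Nat) from rfl, List.take_succ_cons, List.take_nil,
        List.tail_cons, List.zip_cons_cons, List.zip_nil_right,
        PySem.List.enumerate_cons, PySem.List.enumerate_nil, List.map_cons, List.map_nil,
        pv_chunk_nil, List.cons_append, List.nil_append]
      norm_num [pv_zero_bor, show Int.toNat 0 = (0:Nat) from rfl, show Int.toNat 1 = (1:Nat) from rfl, show Int.toNat 2 = (2:Nat) from rfl, show Int.toNat 3 = (3:Nat) from rfl, show Int.toNat 4 = (4:Nat) from rfl, show Int.toNat 5 = (5:Nat) from rfl, show Int.toNat 6 = (6:Nat) from rfl, show Int.toNat 7 = (7:Nat) from rfl, show Int.toNat 8 = (8:Nat) from rfl, show Int.toNat 9 = (9:Nat) from rfl]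
  | [x1,x2,x3,x4,x5], res => by
      conv_rhs => rw [pvChunk]
      rw [if_neg (by exact List.cons_ne_nil _ _)]
      simp only [pvBlockOut, PySem.List.slice_some_none, PySem.List.slice_to _ (by norm_num : (0:Int) ≤ 9)]
      norm_num [PySem.List.clampIdx]
      simp only [show Int.toNat 9 = (9:Nat) from rfl, List.take_succ_cons, List.take_nil,
        List.tail_cons, List.zip_cons_cons, List.zip_nil_right,
        PySem.List.enumerate_cons, PySem.List.enumerate_nil, List.map_cons, List.map_nil,
        pv_chunk_nil, List.cons_append, List.nil_append]
      norm_num [pv_zero_bor, show Int.toNat 0 = (0:Nat) from rfl, show Int.toNat 1 = (1:Nat) from rfl, show Int.toNat 2 = (2:Nat) from rfl, show Int.toNat 3 = (3:Nat) from rfl, show Int.toNat 4 = (4:Nat) from rfl, show Int.toNat 5 = (5:Nat) from rfl, show Int.toNat 6 = (6:Nat) from rfl, show Int.toNat 7 = (7:Nat) from rfl, show Int.toNat 8 = (8:Nat) from rfl, show Int.toNat 9 = (9:Nat) from rfl]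
  | [x1,x2,x3,x4,x5,x6], res => by
      conv_rhs => rw [pvChunk]
      rw [if_neg (by exact List.cons_ne_nil _ _)]
      simp only [pvBlockOut, PySem.List.slice_some_none, PySem.List.slice_to _ (by norm_num : (0:Int) ≤ 9)]
      norm_num [PySem.List.clampIdx]
      simp only [show Int.toNat 9 = (9:Nat) from rfl, List.take_succ_cons, List.take_nil,
        List.tail_cons, List.zip_cons_cons, List.zip_nil_right,
        PySem.List.enumerate_cons, PySem.List.enumerate_nil, List.map_cons, List.map_nil,
        pv_chunk_nil, List.cons_append, List.nil_append]
      norm_num [pv_zero_bor, show Int.toNat 0 = (0:Nat) from rfl, show Int.toNat 1 = (1:Nat) from rfl, show Int.toNat 2 = (2:Nat) from rfl, show Int.toNat 3 = (3:Nat) from rfl, show Int.toNat 4 = (4:Nat) from rfl, show Int.toNat 5 = (5:Nat) from rfl, show Int.toNat 6 = (6:Nat) from rfl, show Int.toNat 7 = (7:Nat) from rfl, show Int.toNat 8 = (8:Nat) from rfl, show Int.toNat 9 = (9:Nat) from rfl]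
  | [x1,x2,x3,x4,x5,x6,x7], res => by
      conv_rhs => rw [pvChunk]
      rw [if_neg (by exact List.cons_ne_nil _ _)]
      simp only [pvBlockOut, PySem.List.slice_some_none, PySem.List.slice_to _ (by norm_num : (0:Int) ≤ 9)]
      norm_num [PySem.List.clampIdx]
      simp only [show Int.toNat 9 = (9:Nat) from rfl, List.take_succ_cons, List.take_nil,
        List.tail_cons, List.zip_cons_cons, List.zip_nil_right,
        PySem.List.enumerate_cons, PySem.List.enumerate_nil, List.map_cons, List.map_nil,
        pv_chunk_nil, List.cons_append, List.nil_append]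
      norm_num [pv_zero_bor, show Int.toNat 0 = (0:Nat) from rfl, show Int.toNat 1 = (1:Nat) from rfl, show Int.toNat 2 = (2:Nat) from rfl, show Int.toNat 3 = (3:Nat) from rfl, show Int.toNat 4 = (4:Nat) from rfl, show Int.toNat 5 = (5:Nat) from rfl, show Int.toNat 6 = (6:Nat) from rfl, show Int.toNat 7 = (7:Nat) from rfl, show Int.toNat 8 = (8:Nat) from rfl, show Int.toNat 9 = (9:Nat) from rfl]
  | [x1,x2,x3,x4,x5,x6,x7,x8], res => by
      conv_rhs => rw [pvChunk]
      rw [if_neg (by exact List.cons_ne_nil _ _)]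
      simp only [pvBlockOut, PySem.List.slice_some_none, PySem.List.slice_to _ (by norm_num : (0:Int) ≤ 9)]
      norm_num [PySem.List.clampIdx]
      simp only [show Int.toNat 9 = (9:Nat) from rfl, List.take_succ_cons, List.take_nil,
        List.tail_cons, List.zip_cons_cons, List.zip_nil_right,
        PySem.List.enumerate_cons, PySem.List.enumerate_nil, List.map_cons, List.map_nil,
        pv_chunk_nil, List.cons_append, List.nil_append]
      norm_num [pv_zero_bor, show Int.toNat 0 = (0:Nat) from rfl, show Int.toNat 1 = (1:Nat) from rfl, show Int.toNat 2 = (2:Nat) from rfl, show Int.toNat 3 = (3:Nat) from rfl, show Int.toNat 4 = (4:Nat) from rfl, show Int.toNat 5 = (5:Nat) from rfl, show Int.toNat 6 = (6:Nat) from rfl, show Int.toNat 7 = (7:Nat) from rfl, show Int.toNat 8 = (8:Nat) from rfl, show Int.toNat 9 = (9:Nat) from rfl]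
  | x1::x2::x3::x4::x5::x6::x7::x8::x9::rest, res => by
      have ih := pv_main rest
      simp only [List.foldl_cons, pv_stepA_0, pv_stepA_1, pv_stepA_2, pv_stepA_3,
        pv_stepA_4, pv_stepA_5, pv_stepA_6, pv_stepA_7, pv_stepA_8]
      rw [ih]
      conv_rhs => rw [pvChunk]
      rw [if_neg (by exact List.cons_ne_nil _ _)]
      simp only [pvBlockOut, PySem.List.slice_some_none, PySem.List.slice_to _ (by norm_num : (0:Int) ≤ 9)]
      rw [show PySem.List.clampIdx (x1::x2::x3::x4::x5::x6::x7::x8::x9::rest).length 9 = 9 from by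
        simp [PySem.List.clampIdx]]
      simp only [show Int.toNat 9 = (9:Nat) from rfl, List.drop_succ_cons, List.drop_zero,
        List.take_succ_cons, List.take_zero,
        
        List.append_assoc, List.cons_append, List.nil_append]
      norm_num [pv_zero_bor, show Int.toNat 0 = (0:Nat) from rfl, show Int.toNat 1 = (1:Nat) from rfl, show Int.toNat 2 = (2:Nat) from rfl, show Int.toNat 3 = (3:Nat) from rfl, show Int.toNat 4 = (4:Nat) from rfl, show Int.toNat 5 = (5:Nat) from rfl, show Int.toNat 6 = (6:Nat) from rfl, show Int.toNat 7 = (7:Nat) from rfl, show Int.toNat 8 = (8:Nat) from rfl, show Int.toNat 9 = (9:Nat) from rfl]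

lemma pv_altLoop_eq (data : List Int) (base : Int) (hb : 0 ≤ base) (out : List Int) :
    pvAltLoop data out base = out ++ pvChunk (data.drop base.toNat) := by
  rw [pvAltLoop]
  by_cases h : base < (data.length : Int)
  · rw [if_pos h]
    rw [pv_altLoop_eq data (base + 9) (by omega) _]
    rw [PySem.List.slice_toNat data hb (by omega)]
    rw [show (base + 9).toNat - base.toNat = 9 from by omega]
    conv_rhs => rw [pvChunk]
    rw [if_neg (by simp only [List.drop_eq_nil_iff]; omega)]
    rw [PySem.List.slice_to _ (by norm_num : (0:Int) ≤ 9),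
        PySem.List.slice_some_none, PySem.List.clampIdx]
    rw [show Int.toNat 9 = (9:Nat) from rfl]
    norm_num
    by_cases hlen : 9 ≤ data.length - base.toNat
    · rw [show base.toNat + min 9 (data.length - base.toNat) = (base + 9).toNat from by omega]
    · rw [List.drop_of_length_le (show data.length ≤ (base + 9).toNat from by omega),
          List.drop_of_length_le (show data.length ≤ base.toNat + min 9 (data.length - base.toNat) from by omega)]
  · rw [if_neg h]
    rw [List.drop_of_length_le (by omega), pv_chunk_nil, List.append_nil]
termination_by ((data.length : Int) - base).toNat
decreasing_by omega

-- ===== VERDICT (by name: the statement is the Claim_ definition above) =====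
theorem bytes_to_9bit_array_spec : Claim_equal_bytes_to_9bit_array := by
  intro data _
  unfold Spec_bytes_to_9bit_array bytes_to_9bit_array bytes_to_9bit_array_alt
  rw [pv_altLoop_eq data 0 le_rfl []]
  simpa using pv_main data []
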